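-- pv_equiv track=rewrite | github.com/AJSilver00/Uni-Exercises | main.py | GreatestSumSet
-- ===== SOURCE A (Python) =====
-- def GreatestSumSet(pairs):
--     lst = list(pairs)
--     temp = []
--     for x in range(len(lst)):
--         element = list(lst[x])
--         tempsum = element[0] + element[1]
--         temp.append(tempsum)
--     greatestsum = max(temp)
--
--     for x in range(len(lst)):
--         element = list(lst[x])
--         if greatestsum == element[0] + element[1]:
--             pair = tuple(element)
--             return pair
-- ===== SOURCE B (Python) =====
-- def GreatestSumSet(pairs):
--     return tuple(max(list(pairs), key=lambda p: p[0] + p[1]))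
-- ===== Notes on version B (the rewrite author's own statement) =====
-- stated objective: simpler
-- what changed: Replaces the two explicit passes (build a list of sums, take its max, then rescan for the first pair attaining it) with a single max(..., key=sum-of-pair) call, which returns the first maximal pair directly.
-- outside the precondition, e.g. on GreatestSumSet([]): A raises ValueError, B raises ValueError
import Mathlib
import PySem

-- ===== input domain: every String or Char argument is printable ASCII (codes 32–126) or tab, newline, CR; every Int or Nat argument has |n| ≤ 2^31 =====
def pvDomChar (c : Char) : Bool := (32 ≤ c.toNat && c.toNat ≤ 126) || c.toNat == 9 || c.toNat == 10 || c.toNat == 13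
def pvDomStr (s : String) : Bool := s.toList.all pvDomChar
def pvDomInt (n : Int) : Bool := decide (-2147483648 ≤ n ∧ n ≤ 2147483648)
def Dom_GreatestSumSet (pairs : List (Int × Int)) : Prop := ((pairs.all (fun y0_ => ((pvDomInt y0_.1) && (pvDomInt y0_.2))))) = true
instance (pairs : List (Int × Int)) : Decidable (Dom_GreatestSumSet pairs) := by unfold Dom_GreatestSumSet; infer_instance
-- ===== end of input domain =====

-- B replaces A's two passes (list of sums + max + rescan) by a single first-maximal scan (max with key); objective: simpler.


-- ===== PORT A =====
-- Literal port: first loop appends each pair's sum to temp; max(temp) raises on temp = []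
-- (excluded by Pre_, the .getD defaults are unreachable there); second loop returns the
-- first pair whose sum equals greatestsum (always found when pairs ≠ []).
def GreatestSumSet (pairs : List (Int × Int)) : Int × Int :=
  let lst := pairs
  let temp := lst.foldl (fun acc element => acc ++ [element.1 + element.2]) []
  let greatestsum := (PySem.List.max? temp (fun y => y)).getD 0
  (lst.findSome? (fun element =>
      if greatestsum == element.1 + element.2 then some element else none)).getD (0, 0)

-- ===== PORT B =====
-- Port of Source B: max(pairs, key=sum) — PySem.List.max? returns the FIRST extremal element;
-- Python raises on [] (excluded by Pre_), so the .getD default is unreachable.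
def GreatestSumSet_alt (pairs : List (Int × Int)) : Int × Int :=
  (PySem.List.max? pairs (fun p => p.1 + p.2)).getD (0, 0)

-- ===== PRECONDITION & SPEC =====
-- A (and B) raise ValueError (max of an empty sequence) on []; Pre_ excludes exactly that.
def Pre_GreatestSumSet (pairs : List (Int × Int)) : Prop := 0 < pairs.length
instance (pairs : List (Int × Int)) : Decidable (Pre_GreatestSumSet pairs) := by unfold Pre_GreatestSumSet; infer_instance
def pvWitness_GreatestSumSet : (List (Int × Int)) := [(1, 2), (3, 4)]

def Spec_GreatestSumSet (pairs : List (Int × Int)) (out : Int × Int) : Prop := out = GreatestSumSet_alt pairs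
instance (pairs : List (Int × Int)) (out : Int × Int) : Decidable (Spec_GreatestSumSet pairs out) := by unfold Spec_GreatestSumSet; infer_instance

-- ===== CLAIM (what is proved, stated in full; the proofs are below) =====
def Claim_equal_GreatestSumSet : Prop := ∀ (pairs : List (Int × Int)), Dom_GreatestSumSet pairs → Pre_GreatestSumSet pairs → Spec_GreatestSumSet pairs (GreatestSumSet pairs)

-- ===== LEMMAS AND PROOFS =====

-- the key used by both programs, and the "keep the first maximum" step of the max? loop
def pvKey (p : Int × Int) : Int := p.1 + p.2
def pvStep (m x : Int × Int) : Int × Int := if pvKey m < pvKey x then x else m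

theorem key_pvStep (a y : Int × Int) : pvKey (pvStep a y) = max (pvKey a) (pvKey y) := by
  unfold pvStep; split_ifs with h
  · exact (max_eq_right h.le).symm
  · exact (max_eq_left (not_lt.1 h)).symm

-- the max? fold, seeded with `some a`, is the plain pvStep fold
theorem max?_cons_eq_foldl (a : Int × Int) (t : List (Int × Int)) :
    PySem.List.max? (a :: t) pvKey = some (t.foldl pvStep a) := by
  show List.foldl _ (some a) t = _
  induction t generalizing a with
  | nil => rfl
  | cons y t ih =>
    have := ih (pvStep a y)
    simp only [List.foldl_cons]
    rw [show (if pvKey a < pvKey y then some y else some a) = some (pvStep a y) by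
      unfold pvStep; split_ifs <;> rfl]
    exact this

-- the first pair whose key equals the running maximum IS the pvStep fold
theorem find_eq_foldl (t : List (Int × Int)) (a : Int × Int) :
    (a :: t).findSome? (fun element =>
        if t.foldl (fun c y => max c (pvKey y)) (pvKey a) == pvKey element
        then some element else none) = some (t.foldl pvStep a) := by
  induction t generalizing a with
  | nil => simp [List.findSome?]
  | cons y t ih =>
    have hG : (y :: t).foldl (fun c y => max c (pvKey y)) (pvKey a)
        = t.foldl (fun c y => max c (pvKey y)) (pvKey (pvStep a y)) := by
      rw [List.foldl_cons, ← key_pvStep]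
    have hle := (PySem.List.le_foldl_max_int t pvKey (pvKey (pvStep a y))).1
    have ihy := ih (pvStep a y)
    rw [hG]
    simp only [List.foldl_cons]
    by_cases hcase : pvKey a < pvKey y
    · have hstep : pvStep a y = y := by unfold pvStep; exact if_pos hcase
      rw [hstep] at hle ihy ⊢
      have hane : ((t.foldl (fun c y => max c (pvKey y)) (pvKey y)) == pvKey a) = false := by
        simp only [beq_eq_false_iff_ne]; omega
      simp only [List.findSome?_cons, hane, Bool.false_eq_true, if_false]
      exact ihy
    · have hstep : pvStep a y = a := by unfold pvStep; exact if_neg hcase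
      have hya : pvKey y ≤ pvKey a := not_lt.1 hcase
      rw [hstep] at hle ihy ⊢
      by_cases hhead : t.foldl (fun c y => max c (pvKey y)) (pvKey a) = pvKey a
      · have ht : ((t.foldl (fun c y => max c (pvKey y)) (pvKey a)) == pvKey a) = true := by
          simp [hhead]
        simp only [List.findSome?_cons, ht, if_true]
        simp only [List.findSome?_cons, ht, if_true] at ihy
        exact ihy
      · have h1 : ((t.foldl (fun c y => max c (pvKey y)) (pvKey a)) == pvKey a) = false := by
          simp only [beq_eq_false_iff_ne]; exact hhead
        have h2 : ((t.foldl (fun c y => max c (pvKey y)) (pvKey a)) == pvKey y) = false := by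
          simp only [beq_eq_false_iff_ne]; omega
        simp only [List.findSome?_cons, h1, h2, Bool.false_eq_true, if_false]
        simp only [List.findSome?_cons, h1, Bool.false_eq_true, if_false] at ihy
        exact ihy

-- ===== VERDICT (by name: the statement is the Claim_ definition above) =====
theorem GreatestSumSet_spec : Claim_equal_GreatestSumSet := by
  intro pairs _ hpre
  unfold Spec_GreatestSumSet GreatestSumSet GreatestSumSet_alt
  cases pairs with
  | nil => exact absurd hpre (by simp [Pre_GreatestSumSet])
  | cons x t =>
    have htemp : (x :: t).foldl (fun acc e => acc ++ [e.1 + e.2]) ([] : List Int)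
        = (x :: t).map pvKey := by
      rw [PySem.List.foldl_append_singleton_eq_map, List.nil_append]; rfl
    have hmax : PySem.List.max? ((x :: t).map pvKey) (fun y => y)
        = some (t.foldl (fun c y => max c (pvKey y)) (pvKey x)) := by
      rw [List.map_cons, PySem.List.max?_id_cons, List.foldl_map]
    have hB : PySem.List.max? (x :: t) (fun p => p.1 + p.2) = some (t.foldl pvStep x) :=
      max?_cons_eq_foldl x t
    simp only [htemp, hmax, Option.getD_some, hB]
    show (List.findSome? (fun element =>
        if t.foldl (fun c y => max c (pvKey y)) (pvKey x) == pvKey element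
        then some element else none) (x :: t)).getD (0, 0) = t.foldl pvStep x
    rw [find_eq_foldl]
    rfl
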